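-- pv_equiv track=rewrite | github.com/asigalov61/tegridy-tools | tegridy-tools/docs_utils.py | generate_advanced_readme
-- ===== SOURCE A (Python) =====
-- def generate_advanced_readme(strings, title, subtitle):
--     """
--     Generate a polished GitHub‑compatible README.md with:
--     - Title + subtitle
--     - Automatic table of contents
--     - Alphabetical sections
--     - Sorted entries
--     - Collapsible sections
--     - Letter counts
--     - Clean spacing + horizontal rules
--
--     Parameters
--     ----------
--     strings : list[str]
--         List of strings to organize.
--     title : str
--         H1 title for README.
--     subtitle : str
--         H2 subtitle for README.
--
--     Returns
--     -------
--     str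
--         A fully formatted README.md string.
--     """
--
--     # Normalize + sort
--     cleaned = sorted(s.strip() for s in strings if s.strip())
--
--     # Bucket by first letter
--     sections = {}
--     for s in cleaned:
--         first = s[0].upper()
--         if not first.isalpha():
--             first = "#"  # Non-alphabetic bucket
--         sections.setdefault(first, []).append(s)
--
--     # Build README
--     lines = []
--
--     # Title + subtitle
--     lines.append(f"# {title}")
--     lines.append(f"## {subtitle}")
--     lines.append("")
--     lines.append("---")
--     lines.append("")
--
--     # Table of Contents
--     lines.append("## 📚 Table of Contents")
--     lines.append("")
--     for letter in sorted(sections.keys()):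
--         anchor = letter.lower()
--         lines.append(f"- [{letter}](#{anchor})")
--     lines.append("")
--     lines.append("---")
--     lines.append("")
--
--     # Alphabetical sections
--     for letter in sorted(sections.keys()):
--         items = sections[letter]
--         anchor = letter.lower()
--
--         lines.append(f"## {letter}")
--         lines.append(f"<a name=\"{anchor}\"></a>")
--         lines.append("")
--         lines.append(f"**{len(items)} entr{'y' if len(items)==1 else 'ies'}**")
--         lines.append("")
--
--         # Collapsible block
--         lines.append("<details>")
--         lines.append("<summary>Show entries</summary>")
--         lines.append("")
--         for item in items:
--             lines.append(f"* `{item}`")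
--         lines.append("")
--         lines.append("</details>")
--         lines.append("")
--         lines.append("---")
--         lines.append("")
--
--     return "\n".join(lines) + "\n"
-- ===== SOURCE B (Python) =====
-- def _bucket_key(s):
--     c = s[0]
--     return c.upper() if c.isalpha() else "#"
--
-- def _section(letter, items):
--     return ([f"## {letter}", f"<a name=\"{letter.lower()}\"></a>", "",
--              f"**{len(items)} entr{'y' if len(items)==1 else 'ies'}**", "",
--              "<details>", "<summary>Show entries</summary>", ""]
--             + [f"* `{item}`" for item in items]
--             + ["", "</details>", "", "---", ""])
--
-- def generate_advanced_readme(strings, title, subtitle):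
--     cleaned = sorted(s.strip() for s in strings if s.strip())
--     letters = sorted({_bucket_key(s) for s in cleaned})
--     head = [f"# {title}", f"## {subtitle}", "", "---", "",
--             "## 📚 Table of Contents", ""]
--     toc = [f"- [{l}](#{l.lower()})" for l in letters]
--     mid = ["", "---", ""]
--     body = [line
--             for l in letters
--             for line in _section(l, [s for s in cleaned if _bucket_key(s) == l])]
--     return "\n".join(head + toc + mid + body) + "\n"
-- ===== Notes on version B (the rewrite author's own statement) =====
-- stated objective: idiomatic
-- what changed: Replaces the imperative dict-bucketing pass and append-by-append emission loops with a declarative pipeline: a key function, a sorted set of bucket letters, a per-letter filter of the sorted entries, and list comprehensions / a section helper flattened into one join.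
import Mathlib
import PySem

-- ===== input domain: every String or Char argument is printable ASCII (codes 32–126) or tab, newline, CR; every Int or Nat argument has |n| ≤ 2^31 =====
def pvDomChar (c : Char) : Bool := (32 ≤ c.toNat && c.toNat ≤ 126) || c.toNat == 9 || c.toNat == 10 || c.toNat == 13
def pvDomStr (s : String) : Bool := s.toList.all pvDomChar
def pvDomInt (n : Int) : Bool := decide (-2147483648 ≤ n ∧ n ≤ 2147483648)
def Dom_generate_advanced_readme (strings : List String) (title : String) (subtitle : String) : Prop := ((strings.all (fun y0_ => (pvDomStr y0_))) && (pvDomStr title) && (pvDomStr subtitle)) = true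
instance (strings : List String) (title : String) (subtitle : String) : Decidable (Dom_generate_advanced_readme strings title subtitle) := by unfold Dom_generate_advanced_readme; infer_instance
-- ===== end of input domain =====

-- B replaces the dict-bucketing pass and append-by-append emission with a declarative
-- pipeline (sorted set of keys, per-letter filter, comprehensions); objective: idiomatic.

-- ===== PORT A =====
-- first = s[0].upper(); if not first.isalpha(): first = "#"   (the none branch is unreachable:
-- bucketing is only applied to non-empty strings; "".upper().isalpha() is false in Python too)
def bucketKeyA (s : String) : String :=
  match PySem.Str.pyGet? s 0 with
  | none => "#"
  | some c =>
    let first := PySem.Str.upper (String.ofList [c])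
    if PySem.Str.strIsalpha first then first else "#"

def generate_advanced_readme (strings : List String) (title : String) (subtitle : String) : String :=
  let cleaned := PySem.List.sorted ((strings.filter (fun s => PySem.Str.strip s != "")).map PySem.Str.strip) (fun x => x) false
  let sections := cleaned.foldl (fun d s => PySem.Dict.modify d (bucketKeyA s) [] (fun l => l ++ [s])) PySem.Dict.empty
  let lines : List String := ["# " ++ title, "## " ++ subtitle, "", "---", "", "## 📚 Table of Contents", ""]
  let lines := (PySem.List.sorted (PySem.Dict.keys sections) (fun x => x) false).foldl
    (fun acc letter => acc ++ ["- [" ++ letter ++ "](#" ++ PySem.Str.lower letter ++ ")"]) lines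
  let lines := lines ++ ["", "---", ""]
  let lines := (PySem.List.sorted (PySem.Dict.keys sections) (fun x => x) false).foldl
    (fun acc letter =>
      let items := PySem.Dict.getD sections letter []
      let anchor := PySem.Str.lower letter
      let acc := acc ++ ["## " ++ letter, "<a name=\"" ++ anchor ++ "\"></a>", "",
        "**" ++ PySem.Int.toStr (items.length : Int) ++ " entr" ++ (if items.length == 1 then "y" else "ies") ++ "**", "",
        "<details>", "<summary>Show entries</summary>", ""]
      let acc := items.foldl (fun a item => a ++ ["* `" ++ item ++ "`"]) acc
      acc ++ ["", "</details>", "", "---", ""]) lines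
  PySem.Str.join "\n" lines ++ "\n"

-- ===== PORT B =====
def bucketKeyB (s : String) : String :=
  match PySem.Str.pyGet? s 0 with
  | none => "#"
  | some c => if PySem.Chars.isalpha c then String.ofList [PySem.Chars.upperChar c] else "#"

def altSection (letter : String) (items : List String) : List String :=
  ["## " ++ letter, "<a name=\"" ++ PySem.Str.lower letter ++ "\"></a>", "",
   "**" ++ PySem.Int.toStr (items.length : Int) ++ " entr" ++ (if items.length == 1 then "y" else "ies") ++ "**", "",
   "<details>", "<summary>Show entries</summary>", ""]
  ++ items.map (fun item => "* `" ++ item ++ "`")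
  ++ ["", "</details>", "", "---", ""]

def generate_advanced_readme_alt (strings : List String) (title : String) (subtitle : String) : String :=
  let cleaned := PySem.List.sorted ((strings.filter (fun s => PySem.Str.strip s != "")).map PySem.Str.strip) (fun x => x) false
  let letters := PySem.List.sorted (PySem.Set.ofList (cleaned.map bucketKeyB)) (fun x => x) false
  let head : List String := ["# " ++ title, "## " ++ subtitle, "", "---", "", "## 📚 Table of Contents", ""]
  let toc := letters.map (fun l => "- [" ++ l ++ "](#" ++ PySem.Str.lower l ++ ")")
  let mid : List String := ["", "---", ""]
  let body := letters.flatMap (fun l => altSection l (cleaned.filter (fun s => bucketKeyB s == l)))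
  PySem.Str.join "\n" (head ++ toc ++ mid ++ body) ++ "\n"

-- ===== PRECONDITION & SPEC =====
def Spec_generate_advanced_readme (strings : List String) (title : String) (subtitle : String) (out : String) : Prop := out = generate_advanced_readme_alt strings title subtitle
instance (strings : List String) (title : String) (subtitle : String) (out : String) : Decidable (Spec_generate_advanced_readme strings title subtitle out) := by unfold Spec_generate_advanced_readme; infer_instance

-- ===== CLAIM (what is proved, stated in full; the proofs are below) =====
def Claim_equal_generate_advanced_readme : Prop := ∀ (strings : List String) (title : String) (subtitle : String), Dom_generate_advanced_readme strings title subtitle → Spec_generate_advanced_readme strings title subtitle (generate_advanced_readme strings title subtitle)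

-- ===== LEMMAS AND PROOFS =====

theorem key_isalpha (c : Char) : PySem.Chars.isalpha (PySem.Chars.upperChar c) = PySem.Chars.isalpha c := by
  by_cases h : 'a' ≤ c ∧ c ≤ 'z'
  · have h1 : 97 ≤ c.toNat := h.1
    have h2 : c.toNat ≤ 122 := h.2
    have hc : (decide ('a' ≤ c) && decide (c ≤ 'z')) = true := by simp [h.1, h.2]
    have hv : (Char.ofNat (c.toNat - 32)).toNat = c.toNat - 32 := by
      rw [Char.toNat_ofNat, if_pos]; left; omega
    have hA : 'A' ≤ Char.ofNat (c.toNat - 32) := by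
      rw [Char.le_def, UInt32.le_iff_toNat_le]
      show 'A'.toNat ≤ (Char.ofNat (c.toNat - 32)).toNat
      rw [hv]; have : 'A'.toNat = 65 := rfl; omega
    have hZ : Char.ofNat (c.toNat - 32) ≤ 'Z' := by
      rw [Char.le_def, UInt32.le_iff_toNat_le]
      show (Char.ofNat (c.toNat - 32)).toNat ≤ 'Z'.toNat
      rw [hv]; have : 'Z'.toNat = 90 := rfl; omega
    simp only [PySem.Chars.isalpha, PySem.Chars.upperChar, PySem.Chars.islower, PySem.Chars.isupper, hc, if_true]
    simp [hA, hZ]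
  · have hc : (decide ('a' ≤ c) && decide (c ≤ 'z')) = false := by
      rcases not_and_or.mp h with h' | h' <;> simp [h']
    simp [PySem.Chars.upperChar, PySem.Chars.islower, hc]

theorem bucketKey_eq : bucketKeyA = bucketKeyB := by
  funext s
  unfold bucketKeyA bucketKeyB
  cases hg : PySem.Str.pyGet? s 0 with
  | none => rfl
  | some c =>
    have hu : PySem.Str.upper (String.ofList [c]) = String.ofList [PySem.Chars.upperChar c] := by
      simp [PySem.Str.upper, PySem.Chars.upper]
    have ha : PySem.Chars.strIsalpha [PySem.Chars.upperChar c] = PySem.Chars.isalpha c := by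
      simp [PySem.Chars.strIsalpha, key_isalpha c]
    simp only [hu]
    rcases h : PySem.Chars.isalpha c <;> simp [ha, h]

-- the bucketing fold of A, named so the lemmas below can speak about it
def bucketStep (d : PySem.Dict String (List String)) (s : String) : PySem.Dict String (List String) :=
  PySem.Dict.modify d (bucketKeyA s) [] (fun l => l ++ [s])

theorem keys_buckets (cleaned : List String) :
    (cleaned.foldl bucketStep PySem.Dict.empty).keys = PySem.Set.ofList (cleaned.map bucketKeyA) := by
  unfold bucketStep
  rw [PySem.Dict.keys_foldl_modify_key]
  simp [PySem.Set.update, PySem.Set.ofList_eq_foldl, PySem.Dict.keys_empty]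

theorem getD_buckets (cleaned : List String) (c : String) :
    (cleaned.foldl bucketStep PySem.Dict.empty).getD c [] = cleaned.filter (fun s => bucketKeyA s == c) := by
  unfold bucketStep
  have h : cleaned.foldl (fun d s => PySem.Dict.modify d (bucketKeyA s) [] (fun l => l ++ [s])) PySem.Dict.empty
      = (cleaned.map (fun s => (bucketKeyA s, s))).foldl (fun d p => PySem.Dict.modify d p.1 [] (fun l => l ++ [p.2])) PySem.Dict.empty := by
    rw [List.foldl_map]
  rw [h, PySem.Dict.getD_foldl_modify_append]
  simp [List.filter_map, Function.comp_def]

-- the section loop of A appends the lines of altSection letter (f letter) per letter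
theorem section_fold (f : String → List String) (L : List String) (acc : List String) :
    L.foldl (fun acc letter =>
      let items := f letter
      let anchor := PySem.Str.lower letter
      let acc := acc ++ ["## " ++ letter, "<a name=\"" ++ anchor ++ "\"></a>", "",
        "**" ++ PySem.Int.toStr (items.length : Int) ++ " entr" ++ (if items.length == 1 then "y" else "ies") ++ "**", "",
        "<details>", "<summary>Show entries</summary>", ""]
      let acc := items.foldl (fun a item => a ++ ["* `" ++ item ++ "`"]) acc
      acc ++ ["", "</details>", "", "---", ""]) acc
    = acc ++ L.flatMap (fun l => altSection l (f l)) := by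
  induction L generalizing acc with
  | nil => simp
  | cons x xs ih =>
    rw [List.foldl_cons, ih]
    simp only [altSection, List.flatMap_cons, PySem.List.foldl_append_singleton_eq_map,
      List.append_assoc]

-- ===== VERDICT (by name: the statement is the Claim_ definition above) =====
theorem generate_advanced_readme_spec : Claim_equal_generate_advanced_readme := by
  intro strings title subtitle _hdom
  unfold Spec_generate_advanced_readme generate_advanced_readme generate_advanced_readme_alt
  have hb : (fun d s => PySem.Dict.modify d (bucketKeyA s) [] (fun l => l ++ [s])) = bucketStep := rfl
  rw [hb]
  set cleaned := PySem.List.sorted ((strings.filter (fun s => PySem.Str.strip s != "")).map PySem.Str.strip) (fun x => x) false with hcleaned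
  show (let sections := cleaned.foldl bucketStep PySem.Dict.empty
        let lines : List String := ["# " ++ title, "## " ++ subtitle, "", "---", "", "## 📚 Table of Contents", ""]
        let lines := (PySem.List.sorted (PySem.Dict.keys sections) (fun x => x) false).foldl
          (fun acc letter => acc ++ ["- [" ++ letter ++ "](#" ++ PySem.Str.lower letter ++ ")"]) lines
        let lines := lines ++ ["", "---", ""]
        let lines := (PySem.List.sorted (PySem.Dict.keys sections) (fun x => x) false).foldl
          (fun acc letter =>
            let items := PySem.Dict.getD sections letter []
            let anchor := PySem.Str.lower letter
            let acc := acc ++ ["## " ++ letter, "<a name=\"" ++ anchor ++ "\"></a>", "",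
              "**" ++ PySem.Int.toStr (items.length : Int) ++ " entr" ++ (if items.length == 1 then "y" else "ies") ++ "**", "",
              "<details>", "<summary>Show entries</summary>", ""]
            let acc := items.foldl (fun a item => a ++ ["* `" ++ item ++ "`"]) acc
            acc ++ ["", "</details>", "", "---", ""]) lines
        PySem.Str.join "\n" lines ++ "\n") = _
  simp only [keys_buckets, getD_buckets, bucketKey_eq]
  rw [section_fold (fun c => cleaned.filter (fun s => bucketKeyB s == c))]
  simp only [PySem.List.foldl_append_singleton_eq_map, List.append_assoc]
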